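-- pv_equiv track=rewrite | github.com/PythonAndGoCourses2/PythonHomework | mymodule.py | replae_power
-- ===== SOURCE A (Python) =====
-- def replae_power(stroka, lst):
--     i = stroka.rfind('^')
--     if i == -1:
--         return stroka, lst
--     else:
--         power = lst[i] ** lst[i+1]
--         lst[i:i+2] = [power]
--         return replae_power(stroka[:i], lst)
-- ===== SOURCE B (Python) =====
-- def replae_power(stroka, lst):
--     # One left-to-right scan collects all caret positions; the powers are then
--     # applied right-to-left in a single loop (instead of A's recursion on a
--     # fresh prefix copy of the string per caret).
--     # Like A, mutates lst in place via slice assignment.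
--     positions = [i for i, c in enumerate(stroka) if c == '^']
--     for p in reversed(positions):
--         lst[p:p + 2] = [lst[p] ** lst[p + 1]]
--     if positions:
--         stroka = stroka[:positions[0]]
--     return stroka, lst
-- ===== Notes on version B (the rewrite author's own statement) =====
-- stated objective: alternative
-- what changed: B collects all caret positions in one enumerate scan and applies the powers right-to-left in a single loop, instead of A's recursion which rescans a fresh prefix copy of the string with rfind at every caret.
-- outside the precondition, e.g. on replae_power('^', [2, -1]): A returns ('', [0.5]), B returns ('', [0.5]); on replae_power('x^y', [5, 2, -1]): A returns ('x', [5, 0.5]), B returns ('x', [5, 0.5])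
import Mathlib
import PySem

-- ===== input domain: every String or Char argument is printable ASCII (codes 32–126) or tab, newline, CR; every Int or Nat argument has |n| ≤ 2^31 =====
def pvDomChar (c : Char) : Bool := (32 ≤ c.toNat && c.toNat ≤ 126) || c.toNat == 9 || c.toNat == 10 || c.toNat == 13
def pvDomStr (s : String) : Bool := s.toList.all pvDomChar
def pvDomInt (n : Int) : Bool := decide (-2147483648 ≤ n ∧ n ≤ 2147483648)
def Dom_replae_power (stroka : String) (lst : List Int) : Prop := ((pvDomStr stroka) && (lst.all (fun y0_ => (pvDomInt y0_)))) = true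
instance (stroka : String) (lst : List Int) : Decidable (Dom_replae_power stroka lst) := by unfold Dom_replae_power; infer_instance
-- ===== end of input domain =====

-- B replaces A's recursion (which rescans a fresh prefix copy of the string with rfind at
-- every caret) by one scan collecting the caret positions and one right-to-left loop of
-- power merges.  Python A and B both mutate lst in place the same way; the equivalence
-- proved here is about the return value.

-- Python's `a ** b` for int operands, exact for 0 ≤ b (a negative b gives a float or a
-- ZeroDivisionError in Python and is outside Pre_); shared by both ports because the line
-- `lst[i] ** lst[i+1]` is literally the same in A and B.
def pyPow (a b : Int) : Int := if 0 ≤ b then a ^ b.toNat else 0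

-- caret positions of the string: used by Pre_ and by the characterisation of rfind that
-- the port of A cites in its termination proof.
def caretsN (s : List Char) : List Nat :=
  (List.range s.length).filter (fun j => s[j]? == some '^')

theorem prefix_single (s : List Char) (j : Nat) :
    (['^'] : List Char).isPrefixOf (s.drop j) = (s[j]? == some '^') := by
  have h0 : (s.drop j)[0]? = s[j]? := by simp [List.getElem?_drop]
  cases hd : s.drop j with
  | nil => rw [hd] at h0; simp [List.isPrefixOf, ← h0]
  | cons a t => rw [hd] at h0; simp [List.isPrefixOf, ← h0, eq_comm]

theorem rfind_go_caret (s : List Char) (n : Nat) :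
    PySem.Chars.rfind.go s ['^'] n =
      match (List.range (n+1)).reverse.find? (fun j => s[j]? == some '^') with
      | none => -1
      | some p => (p : Int) := by
  induction n with
  | zero =>
      show (if (['^'] : List Char).isPrefixOf s then (0:Int) else -1) = _
      rw [show (['^'] : List Char).isPrefixOf s = (s[0]? == some '^') by
        simpa using prefix_single s 0]
      rcases h : (s[0]? == some '^') with _ | _ <;> simp [List.find?, h]
  | succ j ih =>
      show (if (['^'] : List Char).isPrefixOf (s.drop (j+1)) then ((j:Int)+1) else PySem.Chars.rfind.go s ['^'] j) = _
      rw [prefix_single]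
      have hr : (List.range (j+1+1)).reverse = (j+1) :: (List.range (j+1)).reverse := by
        simp [List.range_succ]
      rw [hr]
      rcases h : (s[j+1]? == some '^') with _ | _
      · simpa [List.find?, h] using ih
      · simp [List.find?, h]

theorem rfind_caret (s : List Char) :
    PySem.Chars.rfind s ['^'] =
      match (caretsN s).getLast? with
      | none => -1
      | some p => (p : Int) := by
  have h1 : PySem.Chars.rfind s ['^'] = PySem.Chars.rfind.go s ['^'] s.length := rfl
  rw [h1, rfind_go_caret]
  have h2 : (caretsN s).getLast? = (List.range (s.length+1)).reverse.find? (fun j => s[j]? == some '^') := by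
    rw [caretsN, List.getLast?_eq_head?_reverse, ← List.filter_reverse, List.head?_filter]
    have hr : (List.range (s.length+1)).reverse = s.length :: (List.range s.length).reverse := by
      simp [List.range_succ]
    rw [hr, List.find?_cons_of_neg]
    simp
  rw [h2]


-- ===== PORT A =====
def replae_power (stroka : String) (lst : List Int) : String × List Int :=
  let i := PySem.Str.rfind stroka "^"
  if _h : i = -1 then (stroka, lst)
  else
    let power := pyPow ((PySem.List.pyGet? lst i).getD 0) ((PySem.List.pyGet? lst (i+1)).getD 0)
    let lst2 := PySem.List.slice lst none (some i) ++ [power] ++ PySem.List.slice lst (some (i+2)) none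
    replae_power (PySem.Str.slice stroka none (some i)) lst2
termination_by stroka.toList.length
decreasing_by
  have hcar : "^".toList = ['^'] := rfl
  rcases hl : (caretsN stroka.toList).getLast? with _ | p
  · exfalso; apply _h
    show PySem.Str.rfind stroka "^" = -1
    rw [PySem.Str.rfind_eq, hcar, rfind_caret, hl]
  · have hp : p ∈ caretsN stroka.toList := List.mem_of_getLast? hl
    have hlt : p < stroka.toList.length := by
      unfold caretsN at hp
      exact List.mem_range.mp (List.mem_filter.mp hp).1
    have hi : PySem.Str.rfind stroka "^" = (p : Int) := by
      rw [PySem.Str.rfind_eq, hcar, rfind_caret, hl]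
    show (PySem.Str.slice stroka none (some (PySem.Str.rfind stroka "^"))).toList.length < stroka.toList.length
    rw [hi]
    simp only [PySem.Str.toList_slice, PySem.Chars.slice_eq_listSlice]
    rw [PySem.List.slice_to _ (by positivity)]
    simp only [List.length_take, Int.toNat_natCast]
    omega

-- ===== PORT B =====
def replae_power_alt (stroka : String) (lst : List Int) : String × List Int :=
  let positions := ((PySem.List.enumerate stroka.toList).filter (fun ic => ic.2 == '^')).map (fun ic => ic.1)
  let lst2 := positions.reverse.foldl
    (fun l p =>
      List.take p.toNat l
        ++ [pyPow ((PySem.List.pyGet? l p).getD 0) ((PySem.List.pyGet? l (p+1)).getD 0)]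
        ++ List.drop (p.toNat + 2) l) lst
  let s2 :=
    match positions with
    | [] => stroka
    | p :: _ => PySem.Str.slice stroka none (some p)
  (s2, lst2)


-- ===== PRECONDITION & SPEC =====
-- towerVal l rest p = the value the element at position p contributes when the carets are
-- merged right-to-left (rest = the string suffix after position p): a right-associated
-- power tower over a maximal run of adjacent carets, and plainly l[p] otherwise.
def towerVal (l : List Int) : List Char → Nat → Int
  | [], p => l.getD p 0
  | c :: rest, p => if c == '^' then pyPow (l.getD p 0) (towerVal l rest (p+1)) else l.getD p 0

-- Pre_ excludes exactly the inputs on which Python A raises (IndexError from lst[i+1] when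
-- the spliced list is too short, ZeroDivisionError from 0 ** negative) or returns a float,
-- outside the declared int type (a negative exponent at some merge): it requires, for every
-- caret p, that both indices of its merge are in range when its turn comes and that the
-- exponent it receives — towerVal at p+1 — is nonnegative.
def Pre_replae_power (stroka : String) (lst : List Int) : Prop :=
  ∀ p ∈ caretsN stroka.toList,
    ((caretsN stroka.toList).filter (fun q => p < q)).length + p + 2 ≤ lst.length ∧
    0 ≤ towerVal lst (stroka.toList.drop (p+1)) (p+1)
instance (stroka : String) (lst : List Int) : Decidable (Pre_replae_power stroka lst) := by
  unfold Pre_replae_power; infer_instance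

def pvWitness_replae_power : String × List Int := ("a^b", [2, 3, 2])

def Spec_replae_power (stroka : String) (lst : List Int) (out : String × List Int) : Prop := out = replae_power_alt stroka lst
instance (stroka : String) (lst : List Int) (out : String × List Int) : Decidable (Spec_replae_power stroka lst out) := by unfold Spec_replae_power; infer_instance

-- ===== CLAIM (what is proved, stated in full; the proofs are below) =====
def Claim_equal_replae_power : Prop := ∀ (stroka : String) (lst : List Int), Dom_replae_power stroka lst → Pre_replae_power stroka lst → Spec_replae_power stroka lst (replae_power stroka lst)

-- ===== LEMMAS AND PROOFS =====

def spliceP (l : List Int) (p : Nat) : List Int :=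
  l.take p ++ [pyPow (l[p]?.getD 0) (l[p+1]?.getD 0)] ++ l.drop (p+2)

theorem enum_filter_map (s : List Char) (k : Int) :
    ((PySem.List.enumerate s k).filter (fun ic => ic.2 == '^')).map (fun ic => ic.1)
      = ((List.range s.length).filter (fun j => s[j]? == some '^')).map (fun (j : Nat) => k + (j : Int)) := by
  induction s generalizing k with
  | nil => simp [PySem.List.enumerate]
  | cons c t ih =>
      have he : PySem.List.enumerate (c :: t) k = (k, c) :: PySem.List.enumerate t (k+1) := rfl
      rw [he]
      have hr : List.range (t.length + 1) = 0 :: (List.range t.length).map Nat.succ :=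
        List.range_succ_eq_map
      simp only [List.length_cons, hr, List.filter_cons, List.filter_map]
      rcases h : (c == '^') with _ | _ <;>
        simp [h, ih, Function.comp_def, List.map_map] <;>
        (intro a h1 h2; ring)
theorem alt_positions (s : String) :
    ((PySem.List.enumerate s.toList).filter (fun ic => ic.2 == '^')).map (fun ic => ic.1)
      = (caretsN s.toList).map (fun (j : Nat) => (j : Int)) := by
  have := enum_filter_map s.toList 0
  simpa [caretsN] using this

theorem spliceP_step (l : List Int) (p : Nat) :
    (List.take ((p : Int)).toNat l
      ++ [pyPow ((PySem.List.pyGet? l (p : Int)).getD 0) ((PySem.List.pyGet? l ((p : Int)+1)).getD 0)]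
      ++ List.drop (((p : Int)).toNat + 2) l) = spliceP l p := by
  have h1 : ((p : Int) + 1) = ((p + 1 : Nat) : Int) := by push_cast; ring
  rw [spliceP]
  simp only [h1, PySem.List.pyGet?_natCast, Int.toNat_natCast]

theorem alt_eq (s : String) (lst : List Int) :
    replae_power_alt s lst =
      ((match caretsN s.toList with
        | [] => s
        | q :: _ => PySem.Str.slice s none (some (q : Int))),
       (caretsN s.toList).reverse.foldl (fun l p => spliceP l p) lst) := by
  rw [replae_power_alt]
  simp only [alt_positions]
  refine congrArg₂ Prod.mk ?_ ?_
  · cases caretsN s.toList with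
    | nil => simp
    | cons q t => simp
  · rw [← List.map_reverse, List.foldl_map]
    simp only [spliceP_step]

theorem carets_pairwise (s : List Char) : (caretsN s).Pairwise (· < ·) :=
  (List.pairwise_lt_range).sublist List.filter_sublist

theorem carets_take {s : List Char} {Q : List Nat} {p : Nat}
    (h : caretsN s = Q ++ [p]) : caretsN (s.take p) = Q := by
  have hpmem : p ∈ caretsN s := by rw [h]; simp
  have hplt : p < s.length := List.mem_range.mp (List.mem_filter.mp hpmem).1
  have hppred : (s[p]? == some '^') = true := (List.mem_filter.mp hpmem).2
  have hQlt : ∀ q ∈ Q, q < p := by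
    have hp := carets_pairwise s
    rw [h] at hp
    intro q hq
    exact (List.pairwise_append.mp hp).2.2 q hq p (by simp)
  have hlen : (s.take p).length = p := by simp [Nat.le_of_lt hplt]
  have hcar : caretsN (s.take p) = (List.range p).filter (fun j => s[j]? == some '^') := by
    rw [caretsN, hlen]
    apply List.filter_congr
    intro j hj
    rw [List.getElem?_take_of_lt (List.mem_range.mp hj)]
  have hsplit : List.range s.length
      = List.range p ++ (List.range (s.length - p)).map (p + ·) := by
    conv_lhs => rw [show s.length = p + (s.length - p) by omega]
    exact List.range_add
  have hFG : (List.range p).filter (fun j => s[j]? == some '^')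
      ++ ((List.range (s.length - p)).map (p + ·)).filter (fun j => s[j]? == some '^')
      = Q ++ [p] := by
    rw [← List.filter_append, ← hsplit, ← caretsN, h]
  set F := (List.range p).filter (fun j => s[j]? == some '^') with hF
  set G := ((List.range (s.length - p)).map (p + ·)).filter (fun j => s[j]? == some '^') with hG
  have hGall : ∀ x ∈ G, x = p := by
    intro x hx
    obtain ⟨hxm, hxp⟩ := List.mem_filter.mp hx
    obtain ⟨j, hj, rfl⟩ := List.mem_map.mp hxm
    have hxin : p + j ∈ caretsN s := by
      refine List.mem_filter.mpr ⟨List.mem_range.mpr ?_, hxp⟩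
      have := List.mem_range.mp hj
      omega
    rw [h] at hxin
    rcases List.mem_append.mp hxin with hxin | hxin
    · have := hQlt _ hxin; omega
    · simpa using hxin
  have hpG : p ∈ G := by
    refine List.mem_filter.mpr ⟨?_, hppred⟩
    exact List.mem_map.mpr ⟨0, List.mem_range.mpr (by omega), by omega⟩
  have hGnodup : G.Nodup := by
    refine List.Nodup.filter _ ?_
    exact (List.nodup_range).map (fun a b hab => by omega)
  have hGeq : G = [p] := by
    cases hGl : G with
    | nil => rw [hGl] at hpG; simp at hpG
    | cons a t =>
        have ha : a = p := hGall a (by rw [hGl]; simp)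
        cases t with
        | nil => rw [ha]
        | cons b t2 =>
            have hb : b = p := hGall b (by rw [hGl]; simp)
            rw [hGl] at hGnodup
            rw [ha, hb] at hGnodup
            simp at hGnodup
  rw [hGeq] at hFG
  have : F = Q := by
    have := List.append_inj_left' hFG (by rfl)
    exact this
  rw [hcar]
  exact this

theorem sliceA_step (lst : List Int) (p : Nat) :
    PySem.List.slice lst none (some (p : Int))
      ++ [pyPow ((PySem.List.pyGet? lst (p : Int)).getD 0) ((PySem.List.pyGet? lst ((p : Int)+1)).getD 0)]
      ++ PySem.List.slice lst (some ((p : Int)+2)) none = spliceP lst p := by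
  rw [PySem.List.slice_to _ (by positivity), PySem.List.slice_from _ (by positivity)]
  have h1 : ((p : Int) + 1) = ((p + 1 : Nat) : Int) := by push_cast; ring
  have h2 : ((p : Int) + 2).toNat = p + 2 := by omega
  rw [spliceP, h1, h2]
  simp only [PySem.List.pyGet?_natCast, Int.toNat_natCast]

theorem main_eq : ∀ (stroka : String) (lst : List Int),
    replae_power stroka lst = replae_power_alt stroka lst := by
  suffices H : ∀ (n : Nat) (s : String), s.toList.length = n → ∀ lst, replae_power s lst = replae_power_alt s lst by
    intro s lst; exact H s.toList.length s rfl lst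
  intro n
  induction n using Nat.strong_induction_on with
  | _ n ih =>
    intro s hlen lst
    have hcar : "^".toList = ['^'] := rfl
    rw [replae_power]
    rcases hl : (caretsN s.toList).getLast? with _ | p
    · have hnil : caretsN s.toList = [] := by
        cases hc : caretsN s.toList with
        | nil => rfl
        | cons a t => rw [hc] at hl; simp [List.getLast?] at hl
      have hi : PySem.Str.rfind s "^" = -1 := by
        rw [PySem.Str.rfind_eq, hcar, rfind_caret, hl]
      rw [alt_eq, hnil]
      have hi' : PySem.Chars.rfind s.toList ['^'] = -1 := by rw [rfind_caret, hl]
      simp [hi', hcar]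
    · obtain ⟨Q, hQ⟩ := List.getLast?_eq_some_iff.mp hl
      have hpmem : p ∈ caretsN s.toList := List.mem_of_getLast? hl
      have hplt : p < s.toList.length := List.mem_range.mp (List.mem_filter.mp hpmem).1
      have hi' : PySem.Chars.rfind s.toList ['^'] = (p : Int) := by rw [rfind_caret, hl]
      have hpne : ¬((p : Int) = -1) := by omega
      simp only [PySem.Str.rfind_eq, hcar, hi', dif_neg hpne]
      rw [sliceA_step]
      have hs' : (PySem.Str.slice s none (some (p : Int))).toList = s.toList.take p := by
        simp only [PySem.Str.toList_slice, PySem.Chars.slice_eq_listSlice]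
        rw [PySem.List.slice_to _ (by positivity)]
        simp
      have hplt2 : p < s.length := by
        have : s.length = s.toList.length := by simp
        omega
      have hlen' : (PySem.Str.slice s none (some (p : Int))).toList.length = p := by
        rw [hs']
        simp
        omega
      rw [ih p (by omega) _ hlen']
      rw [alt_eq, alt_eq, hs', carets_take hQ, hQ]
      refine congrArg₂ Prod.mk ?_ ?_
      · cases hqc : Q with
        | nil => simp
        | cons q Q' =>
            have hqlt : q < p := by
              have hp := carets_pairwise s.toList
              rw [hQ, hqc] at hp
              exact (List.pairwise_cons.mp hp).1 p (by simp)
            show String.ofList _ = String.ofList _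
            apply congrArg
            simp only [PySem.Chars.slice_eq_listSlice]
            rw [PySem.List.slice_to _ (by positivity), PySem.List.slice_to _ (by positivity), hs']
            simp [List.take_take, Nat.min_eq_left (Nat.le_of_lt hqlt)]
      · rw [List.reverse_append]
        simp

-- ===== VERDICT (by name: the statement is the Claim_ definition above) =====
theorem replae_power_spec : Claim_equal_replae_power := by
  intro stroka lst _ _
  unfold Spec_replae_power
  exact main_eq stroka lst
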